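-- pv_equiv track=rewrite | github.com/averkij/lang-helpers | lib/search_engine.py | _token_has_features
-- ===== SOURCE A (Python) =====
-- def _parse_feature(feature_str: str) -> tuple[str, str] | None:
--     """
--     Разбирает строку признака вида "Case=Abl" на пару (категория, значение).
--
--     Args:
--         feature_str: строка вида "Category=Value".
--
--     Returns:
--         Кортеж (категория, значение) или None, если формат неверный.
--     """
--     if "=" not in feature_str:
--         return None
--     cat, val = feature_str.split("=", 1)
--     return (cat, val)
--
-- def _token_has_features(token: dict, features: dict[str, list[str]]) -> bool:
--     """
--     Проверяет, содержит ли токен указанные грамматические признаки.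
--
--     Логика:
--     - Значения внутри одной категории объединяются через ИЛИ.
--     - Разные категории объединяются через И.
--     - Токен считается совпавшим, если хотя бы один из его наборов тегов
--       удовлетворяет всем условиям.
--
--     Args:
--         token: словарь токена из корпуса.
--         features: словарь категория -> список допустимых значений.
--
--     Returns:
--         True, если токен соответствует всем условиям.
--     """
--     tagsets = token.get("tagsets", [])
--     if not tagsets:
--         return False
--
--     for tagset in tagsets:
--         # Разбираем теги в набор пар (категория, значение)
--         parsed: dict[str, set[str]] = {}
--         for tag in tagset:
--             pair = _parse_feature(tag)
--             if pair:
--                 cat, val = pair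
--                 if cat not in parsed:
--                     parsed[cat] = set()
--                 parsed[cat].add(val)
--
--         # Проверяем, что все требуемые категории представлены
--         all_match = True
--         for req_cat, req_vals in features.items():
--             token_vals = parsed.get(req_cat, set())
--             # ИЛИ внутри категории: хотя бы одно значение должно совпасть
--             if not token_vals.intersection(req_vals):
--                 all_match = False
--                 break
--
--         if all_match:
--             return True
--
--     return False
-- ===== SOURCE B (Python) =====
-- def _parse_feature(feature_str):
--     if "=" not in feature_str:
--         return None
--     cat, val = feature_str.split("=", 1)
--     return (cat, val)
--
--
-- def _token_has_features(token, features):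
--     tagsets = token.get("tagsets", [])
--     if not tagsets:
--         return False
--     for tagset in tagsets:
--         if all(
--             any(
--                 (pair := _parse_feature(tag)) is not None
--                 and pair[0] == req_cat
--                 and pair[1] in req_vals
--                 for tag in tagset
--             )
--             for req_cat, req_vals in features.items()
--         ):
--             return True
--     return False
-- ===== Notes on version B (the rewrite author's own statement) =====
-- stated objective: simpler
-- what changed: Drops A's per-tagset intermediate dict-of-sets index and set intersection; B checks each required category by a direct all/any scan of the raw tags, parsing each tag on the fly.
import Mathlib
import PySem

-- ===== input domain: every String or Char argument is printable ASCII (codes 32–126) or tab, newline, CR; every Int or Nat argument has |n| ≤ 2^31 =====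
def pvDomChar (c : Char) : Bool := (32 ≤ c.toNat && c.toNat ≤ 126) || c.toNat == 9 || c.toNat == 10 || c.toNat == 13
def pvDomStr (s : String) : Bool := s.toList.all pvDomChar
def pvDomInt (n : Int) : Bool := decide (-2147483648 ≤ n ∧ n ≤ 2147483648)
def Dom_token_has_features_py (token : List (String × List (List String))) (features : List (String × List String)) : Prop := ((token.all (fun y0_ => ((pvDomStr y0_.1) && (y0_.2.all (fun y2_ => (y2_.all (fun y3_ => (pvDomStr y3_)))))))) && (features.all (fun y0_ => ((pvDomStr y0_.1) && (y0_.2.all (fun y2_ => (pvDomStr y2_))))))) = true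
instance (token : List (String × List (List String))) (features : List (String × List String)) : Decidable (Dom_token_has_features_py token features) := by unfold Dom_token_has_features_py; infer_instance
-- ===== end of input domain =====

-- B replaces A's per-tagset parsed dict-of-sets and intersection test by a direct all/any scan of the raw tags (simpler decomposition, same results).


-- ===== PORT A =====
-- shared module helper: _parse_feature ("Case=Abl" -> ("Case","Abl"))
def parse_feature (s : String) : Option (String × String) :=
  if PySem.Str.isIn "=" s = false then none
  else
    match PySem.Str.splitMax? s "=" 1 with
    | some (cat :: val :: _) => some (cat, val)
    | _ => none  -- unreachable: split("=",1) with "=" present yields two parts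

-- the inner dict-building loop of A: parsed[cat] is a set of values
def aStep (parsed : PySem.Dict String (PySem.Set String)) (tag : String) :
    PySem.Dict String (PySem.Set String) :=
  match parse_feature tag with
  | none => parsed
  | some (cat, val) =>
    let parsed := if parsed.contains cat then parsed else parsed.insert cat PySem.Set.empty
    parsed.modify cat PySem.Set.empty (fun s => PySem.Set.add s val)

-- A's "all required categories represented" loop (with break)
def aCheck (parsed : PySem.Dict String (PySem.Set String)) :
    List (String × List String) → Bool
  | [] => true
  | (reqCat, reqVals) :: rest =>
    let tokenVals := parsed.getD reqCat PySem.Set.empty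
    if (PySem.Set.inter tokenVals (PySem.Set.ofList reqVals)).isEmpty then false
    else aCheck parsed rest

-- A's outer loop over tagsets (with early return True)
def aLoop (feats : List (String × List String)) : List (List String) → Bool
  | [] => false
  | tagset :: rest =>
    let parsed := tagset.foldl aStep PySem.Dict.empty
    if aCheck parsed feats then true else aLoop feats rest

def token_has_features_py (token : List (String × List (List String))) (features : List (String × List String)) : Bool :=
  let tagsets := (PySem.Dict.ofList token).getD "tagsets" []
  if tagsets.isEmpty then false
  else aLoop (PySem.Dict.ofList features).items tagsets

-- ===== PORT B =====
-- B: no intermediate parsed index — a direct all/any scan of the raw tags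
def bTagMatches (reqCat : String) (reqVals : List String) (tag : String) : Bool :=
  match parse_feature tag with
  | some pair => pair.1 == reqCat && reqVals.contains pair.2
  | none => false

def token_has_features_py_alt (token : List (String × List (List String))) (features : List (String × List String)) : Bool :=
  let tagsets := (PySem.Dict.ofList token).getD "tagsets" []
  if tagsets.isEmpty then false
  else
    tagsets.any (fun tagset =>
      (PySem.Dict.ofList features).items.all (fun rq =>
        tagset.any (bTagMatches rq.1 rq.2)))

-- ===== PRECONDITION & SPEC =====
def Spec_token_has_features_py (token : List (String × List (List String))) (features : List (String × List String)) (out : Bool) : Prop := out = token_has_features_py_alt token features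
instance (token : List (String × List (List String))) (features : List (String × List String)) (out : Bool) : Decidable (Spec_token_has_features_py token features out) := by unfold Spec_token_has_features_py; infer_instance

-- ===== CLAIM (what is proved, stated in full; the proofs are below) =====
def Claim_equal_token_has_features_py : Prop := ∀ (token : List (String × List (List String))) (features : List (String × List String)), Dom_token_has_features_py token features → Spec_token_has_features_py token features (token_has_features_py token features)

-- ===== LEMMAS AND PROOFS =====

-- membership in the parsed index built by A's inner loop
theorem mem_build_getD (tagset : List String) (d : PySem.Dict String (PySem.Set String))
    (c : String) (v : String) :
    v ∈ (tagset.foldl aStep d).getD c PySem.Set.empty ↔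
      v ∈ d.getD c PySem.Set.empty ∨ ∃ t ∈ tagset, parse_feature t = some (c, v) := by
  induction tagset generalizing d with
  | nil => simp
  | cons tag rest ih =>
    simp only [List.foldl_cons, ih, List.mem_cons]
    have hstep : ∀ (d : PySem.Dict String (PySem.Set String)),
        v ∈ (aStep d tag).getD c PySem.Set.empty ↔
          v ∈ d.getD c PySem.Set.empty ∨ parse_feature tag = some (c, v) := by
      intro d
      unfold aStep
      cases hp : parse_feature tag with
      | none => simp
      | some p =>
        obtain ⟨cat, val⟩ := p
        have hd'self :
            (if d.contains cat then d else d.insert cat PySem.Set.empty).getD cat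
              PySem.Set.empty = d.getD cat PySem.Set.empty := by
          by_cases hcon : d.contains cat
          · simp [hcon]
          · rw [if_neg (by simp [hcon]), PySem.Dict.getD_insert,
              PySem.Dict.getD_of_not_contains d _ (by simp [hcon])]
            simp
        have hd'ne : ∀ c' : String, c' ≠ cat →
            (if d.contains cat then d else d.insert cat PySem.Set.empty).getD c'
              PySem.Set.empty = d.getD c' PySem.Set.empty := by
          intro c' h
          by_cases hcon : d.contains cat
          · simp [hcon]
          · rw [if_neg (by simp [hcon]), PySem.Dict.getD_insert, if_neg h]
        simp only [PySem.Dict.modify, PySem.Dict.getD_insert]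
        by_cases hc : c = cat
        · subst hc
          rw [if_pos rfl, hd'self]
          simp [PySem.Set.mem_add, eq_comm]
        · rw [if_neg hc, hd'ne c hc]
          constructor
          · exact Or.inl
          · rintro (h | heq)
            · exact h
            · cases heq
              exact absurd rfl hc
    rw [hstep]
    constructor
    · rintro (⟨h | h⟩ | ⟨t, ht, hpt⟩)
      · exact Or.inl h
      · exact Or.inr ⟨tag, Or.inl rfl, h⟩
      · exact Or.inr ⟨t, Or.inr ht, hpt⟩
    · rintro (h | ⟨t, rfl | ht, hpt⟩)
      · exact Or.inl (Or.inl h)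
      · exact Or.inl (Or.inr hpt)
      · exact Or.inr ⟨t, ht, hpt⟩

-- A's per-tagset check equals B's all/any scan
theorem check_eq_scan (tagset : List String) (feats : List (String × List String)) :
    aCheck (tagset.foldl aStep PySem.Dict.empty) feats =
      feats.all (fun rq => tagset.any (bTagMatches rq.1 rq.2)) := by
  induction feats with
  | nil => rfl
  | cons rq rest ih =>
    obtain ⟨reqCat, reqVals⟩ := rq
    simp only [aCheck, List.all_cons, ← ih]
    have hmatch :
        tagset.any (bTagMatches reqCat reqVals) =
          !(PySem.Set.inter ((tagset.foldl aStep PySem.Dict.empty).getD reqCat PySem.Set.empty)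
              (PySem.Set.ofList reqVals)).isEmpty := by
      rw [Bool.eq_iff_iff]
      simp only [List.any_eq_true, Bool.not_eq_true', List.isEmpty_eq_false_iff_exists_mem]
      constructor
      · rintro ⟨t, ht, hm⟩
        unfold bTagMatches at hm
        cases hp : parse_feature t with
        | none => simp [hp] at hm
        | some p =>
          obtain ⟨c, v⟩ := p
          rw [hp] at hm
          simp only [Bool.and_eq_true, beq_iff_eq, List.contains_eq_mem, decide_eq_true_eq] at hm
          obtain ⟨rfl, hv⟩ := hm
          refine ⟨v, ?_⟩
          unfold PySem.Set.inter
          rw [List.mem_filter]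
          refine ⟨?_, ?_⟩
          · rw [mem_build_getD]
            exact Or.inr ⟨t, ht, hp⟩
          · simpa [PySem.Set.contains_iff, PySem.Set.mem_ofList] using hv
      · rintro ⟨v, hv⟩
        unfold PySem.Set.inter at hv
        rw [List.mem_filter] at hv
        obtain ⟨hv1, hv2⟩ := hv
        rw [mem_build_getD] at hv1
        rcases hv1 with h | ⟨t, ht, hpt⟩
        · simp [PySem.Dict.getD_empty, PySem.Set.empty] at h
        · refine ⟨t, ht, ?_⟩
          have hvr : v ∈ reqVals := by
            simpa [PySem.Set.contains_iff, PySem.Set.mem_ofList] using hv2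
          unfold bTagMatches
          rw [hpt]
          simp [hvr]
    rw [hmatch]
    cases h : ((PySem.Set.inter ((tagset.foldl aStep PySem.Dict.empty).getD reqCat PySem.Set.empty)
        (PySem.Set.ofList reqVals)).isEmpty) <;> simp

-- A's outer loop equals B's any
theorem loop_eq_any (feats : List (String × List String)) (tagsets : List (List String)) :
    aLoop feats tagsets =
      tagsets.any (fun tagset => feats.all (fun rq => tagset.any (bTagMatches rq.1 rq.2))) := by
  induction tagsets with
  | nil => rfl
  | cons tagset rest ih =>
    simp only [aLoop, List.any_cons, ← ih, check_eq_scan]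
    cases h : (feats.all (fun rq => tagset.any (bTagMatches rq.1 rq.2))) <;> simp

-- ===== VERDICT (by name: the statement is the Claim_ definition above) =====
theorem token_has_features_py_spec : Claim_equal_token_has_features_py := by
  intro token features _
  unfold Spec_token_has_features_py token_has_features_py token_has_features_py_alt
  simp only [loop_eq_any]
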